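-- pv_equiv track=rewrite | github.com/paramkushamphanisai/Algorithems | hw4.py | E_Queens
-- ===== SOURCE A (Python) =====
-- def noAttack(Chessboard,rows,columns,n):
--     #check for the columns where queen is attacking
--     for icol in range(columns):
--         if(Chessboard[rows][icol]):
--             return 0
--
--     #check the diagonals where queen is attacking
--     for i,j in zip(range(rows,-1,-1),range(columns,-1,-1)):
--         if Chessboard[i][j]:
--             return 0
--     for i,j in zip(range(rows,n,1),range(columns,-1,-1)):
--         if Chessboard[i][j]:
--             return 0
--     return 1
--
-- def insertNE_Queens(Chessboard,n,solution):
--     #As the broutforce checks all the nodes the loop need to ne of NXN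
--     for l in range(n):
--         i=0
--         while(i < n):
--             k=0
--             j=0
--             while(j<n):
--                 if(noAttack(Chessboard,i,j,n)):
--                     Chessboard[i][j]=1
--                 else:
--                     k=k+1
--                 j=j+1
--             if k==n:
--                 solution.append(False)
--             else:
--                 solution.append(True)
--             i=i+1
--     return solution
--
-- def E_Queens(n):
--     #check for the initial conditions
--     if n==1:
--         return 1
--     if n<4:
--         return 0
--     solution=[]
--     Chessboard=[[0 for j in range(n)]
--              for i in range(n)]
--
--     insertNE_Queens(Chessboard,n,solution)
--     # Solution contains the list of true and false at the queen location valuse of queen location.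
--     # Return the solution list length to get the result
--     return (len(solution))
-- ===== SOURCE B (Python) =====
-- def E_Queens(n):
--     # closed form: A appends exactly one entry per (l, i) pair, n*n in total
--     if n == 1:
--         return 1
--     if n < 4:
--         return 0
--     return n * n
-- ===== Notes on version B (the rewrite author's own statement) =====
-- stated objective: faster
-- what changed: Replaced the O(n^4)-plus board simulation (whose solution list just collects one flag per loop iteration) with the closed form n*n behind the same small-n guards.
import Mathlib
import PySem

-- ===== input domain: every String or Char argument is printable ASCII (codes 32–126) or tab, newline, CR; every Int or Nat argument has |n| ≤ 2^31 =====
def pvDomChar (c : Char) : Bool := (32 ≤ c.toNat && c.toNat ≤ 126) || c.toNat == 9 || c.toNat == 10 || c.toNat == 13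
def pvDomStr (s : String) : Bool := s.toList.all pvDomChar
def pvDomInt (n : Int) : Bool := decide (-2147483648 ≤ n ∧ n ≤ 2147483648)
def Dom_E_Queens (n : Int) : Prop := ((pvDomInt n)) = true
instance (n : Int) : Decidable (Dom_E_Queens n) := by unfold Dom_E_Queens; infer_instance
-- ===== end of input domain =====

-- B replaces A's full board simulation (which only ever counts its own loop iterations) with the closed form n*n behind the same guards; faster.


-- ===== PORT A =====
-- Chessboard[i][j]; on every reachable call the indices are in range, so getD 0 is exact
def pvCellA (b : List (List Int)) (i j : Int) : Int :=
  (PySem.List.pyGet? ((PySem.List.pyGet? b i).getD []) j).getD 0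

-- Chessboard[i][j] = 1; i, j are nonnegative in-range on every reachable call, so .toNat is exact
def pvSetA (b : List (List Int)) (i j : Int) : List (List Int) :=
  b.set i.toNat ((((PySem.List.pyGet? b i).getD []).set j.toNat 1))

def noAttackA (b : List (List Int)) (rows columns n : Int) : Int :=
  if (PySem.List.pyRange 0 columns 1).any (fun icol => pvCellA b rows icol ≠ 0) then 0
  else if ((PySem.List.pyRange rows (-1) (-1)).zip (PySem.List.pyRange columns (-1) (-1))).any
            (fun p => pvCellA b p.1 p.2 ≠ 0) then 0
  else if ((PySem.List.pyRange rows n 1).zip (PySem.List.pyRange columns (-1) (-1))).any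
            (fun p => pvCellA b p.1 p.2 ≠ 0) then 0
  else 1

-- inner while over j: state (Chessboard, k)
def pvRowA (b : List (List Int)) (i n : Int) : List (List Int) × Int :=
  (PySem.List.pyRange 0 n 1).foldl
    (fun (s : List (List Int) × Int) j =>
      if noAttackA s.1 i j n ≠ 0 then (pvSetA s.1 i j, s.2) else (s.1, s.2 + 1))
    (b, 0)

def insertNE_QueensA (b : List (List Int)) (n : Int) (sol : List Bool) :
    List (List Int) × List Bool :=
  (PySem.List.pyRange 0 n 1).foldl
    (fun st _l =>
      (PySem.List.pyRange 0 n 1).foldl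
        (fun (st2 : List (List Int) × List Bool) i =>
          let r := pvRowA st2.1 i n
          (r.1, st2.2 ++ [if r.2 == n then false else true]))
        st)
    (b, sol)

def E_Queens (n : Int) : Int :=
  if n == 1 then 1
  else if n < 4 then 0
  else
    let board := List.replicate n.toNat (List.replicate n.toNat (0 : Int))
    ((insertNE_QueensA board n []).2.length : Int)

-- ===== PORT B =====
def E_Queens_alt (n : Int) : Int :=
  if n == 1 then 1
  else if n < 4 then 0
  else n * n

-- ===== PRECONDITION & SPEC =====
def Spec_E_Queens (n : Int) (out : Int) : Prop := out = E_Queens_alt n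
instance (n : Int) (out : Int) : Decidable (Spec_E_Queens n out) := by unfold Spec_E_Queens; infer_instance

-- ===== CLAIM (what is proved, stated in full; the proofs are below) =====
def Claim_equal_E_Queens : Prop := ∀ (n : Int), Dom_E_Queens n → Spec_E_Queens n (E_Queens n)

-- ===== LEMMAS AND PROOFS =====
-- each inner-fold step appends exactly one flag, so the solution grows by the list's length
theorem pvInner_len (n : Int) (L : List Int) (st : List (List Int) × List Bool) :
    ((L.foldl
        (fun (st2 : List (List Int) × List Bool) i =>
          let r := pvRowA st2.1 i n
          (r.1, st2.2 ++ [if r.2 == n then false else true]))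
        st).2).length = st.2.length + L.length := by
  induction L generalizing st with
  | nil => simp
  | cons a t ih => rw [List.foldl_cons, ih]; simp [List.length_append]; omega

theorem pvOuter_len (n : Int) (L : List Int) (st : List (List Int) × List Bool) :
    ((L.foldl
        (fun st' _l =>
          (PySem.List.pyRange 0 n 1).foldl
            (fun (st2 : List (List Int) × List Bool) i =>
              let r := pvRowA st2.1 i n
              (r.1, st2.2 ++ [if r.2 == n then false else true]))
            st')
        st).2).length
      = st.2.length + L.length * (PySem.List.pyRange 0 n 1).length := by
  induction L generalizing st with
  | nil => simp
  | cons a t ih =>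
      rw [List.foldl_cons, ih, pvInner_len]
      simp only [List.length_cons]
      ring

theorem pvRange_len (n : Int) (h : 0 ≤ n) :
    (PySem.List.pyRange 0 n 1).length = n.toNat := by
  simp [PySem.List.pyRange]
  omega

theorem E_Queens_spec : Claim_equal_E_Queens := by
  intro n _
  unfold Spec_E_Queens E_Queens E_Queens_alt insertNE_QueensA
  by_cases h1 : n = 1
  · simp [h1]
  · by_cases h4 : n < 4
    · simp [h1, h4]
    · have hn : (0:Int) ≤ n := by omega
      rw [if_neg (by simp [h1]), if_neg (by simp [h4]), if_neg (by simp [h1]),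
        if_neg (by simp [h4])]
      simp only [pvOuter_len, pvRange_len n hn, List.length_nil, Nat.zero_add]
      push_cast
      rw [Int.toNat_of_nonneg hn]
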